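-- pv_equiv track=rewrite | github.com/posl/comment_recommendation | script/mod_gen/1_time/en/267_B/6.py | is_split
-- ===== SOURCE A (Python) =====
-- def is_split(pins):
--     if pins[0] == '0':
--         return False
--     columns = []
--     for i in range(1, 11):
--         if pins[i-1] == '1':
--             columns.append(i)
--     for i in range(len(columns)):
--         for j in range(i+1, len(columns)):
--             if columns[j] - columns[i] == 2:
--                 return True
--     return False
-- ===== SOURCE B (Python) =====
-- def is_split(pins):
--     if pins[0] == '0':
--         return False
--     mask = 0
--     for i in range(10):
--         if pins[i] == '1':
--             mask |= 1 << i
--     return mask & (mask >> 2) != 0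
-- ===== Notes on version B (the rewrite author's own statement) =====
-- stated objective: alternative
-- what changed: Instead of collecting a list of set columns and scanning all index pairs for a gap of 2, B packs the ten pins into an integer bitmask and answers with the single shift-and test mask & (mask >> 2) != 0.
import Mathlib
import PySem

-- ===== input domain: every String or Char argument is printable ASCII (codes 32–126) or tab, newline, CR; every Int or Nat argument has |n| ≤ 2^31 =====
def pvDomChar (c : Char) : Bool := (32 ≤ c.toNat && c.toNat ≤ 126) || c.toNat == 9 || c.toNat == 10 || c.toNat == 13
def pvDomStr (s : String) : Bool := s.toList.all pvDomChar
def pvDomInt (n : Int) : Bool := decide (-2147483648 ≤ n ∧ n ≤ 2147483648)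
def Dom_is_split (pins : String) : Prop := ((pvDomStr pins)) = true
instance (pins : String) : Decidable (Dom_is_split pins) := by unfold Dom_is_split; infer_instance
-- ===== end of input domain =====

-- B replaces A's column list and nested index-pair scan by a bitmask of the ten pins
-- and the single shift-and test mask & (mask >> 2) != 0 (alternative algorithm).

-- ===== PORT A =====
def is_split (pins : String) : Bool :=
  match PySem.Str.pyGet? pins 0 with
  | none => false   -- IndexError (empty string); excluded by Pre_
  | some c0 =>
    if c0 = '0' then false
    else
      let columns : List Int := (PySem.List.pyRange 1 11 1).foldl
        (fun acc i =>
          match PySem.Str.pyGet? pins (i - 1) with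
          | none => acc   -- IndexError (string shorter than 10); excluded by Pre_
          | some c => if c = '1' then acc ++ [i] else acc) []
      (PySem.List.pyRange 0 (columns.length : Int) 1).any (fun i =>
        (PySem.List.pyRange (i + 1) (columns.length : Int) 1).any (fun j =>
          PySem.List.pyGetD columns j 0 - PySem.List.pyGetD columns i 0 == 2))

-- ===== PORT B =====
def is_split_alt (pins : String) : Bool :=
  match PySem.Str.pyGet? pins 0 with
  | none => false   -- IndexError (empty string); excluded by Pre_
  | some c0 =>
    if c0 = '0' then false
    else
      let mask : Int := (PySem.List.pyRange 0 10 1).foldl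
        (fun m i =>
          match PySem.Str.pyGet? pins i with
          | none => m   -- IndexError (string shorter than 10); excluded by Pre_
          | some c => if c = '1' then Int.lor m ((1 : Int) <<< i.toNat) else m) 0
        -- i ranges over 0..9, so i.toNat is exact for Python's 1 << i
      (Int.land mask (mask >>> 2)) != 0

-- ===== PRECONDITION & SPEC =====
-- Pre_ excludes exactly the inputs where A raises IndexError: the empty string, and
-- strings shorter than 10 on which A's early return does not fire.
def Pre_is_split (pins : String) : Prop :=
  1 ≤ pins.toList.length ∧ (pins.toList[0]? = some '0' ∨ 10 ≤ pins.toList.length)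
instance (pins : String) : Decidable (Pre_is_split pins) := by unfold Pre_is_split; infer_instance
def pvWitness_is_split : String := "1010100000"

def Spec_is_split (pins : String) (out : Bool) : Prop := out = is_split_alt pins
instance (pins : String) (out : Bool) : Decidable (Spec_is_split pins out) := by unfold Spec_is_split; infer_instance

-- ===== CLAIM (what is proved, stated in full; the proofs are below) =====
def Claim_equal_is_split : Prop := ∀ (pins : String), Dom_is_split pins → Pre_is_split pins → Spec_is_split pins (is_split pins)

-- ===== LEMMAS AND PROOFS =====

-- Both ports depend on the string only through which of the first ten characters are '1'.
def pvBit (pins : String) (i : Int) : Bool :=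
  match PySem.Str.pyGet? pins i with
  | none => false
  | some c => c = '1'

-- the whole equivalence, as a statement about the ten bits (checked by decide)
theorem pv_key (f : Int → Bool) :
    (let columns := ((PySem.List.pyRange 1 11 1).foldl
        (fun acc i => if f (i - 1) then acc ++ [i] else acc) ([] : List Int));
      (PySem.List.pyRange 0 (columns.length : Int) 1).any (fun i =>
        (PySem.List.pyRange (i + 1) (columns.length : Int) 1).any (fun j =>
          PySem.List.pyGetD columns j 0 - PySem.List.pyGetD columns i 0 == 2)))
    = (let mask := ((PySem.List.pyRange 0 10 1).foldl
        (fun m i => if f i then Int.lor m ((1 : Int) <<< i.toNat) else m) (0 : Int));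
      (Int.land mask (mask >>> 2)) != 0) := by
  have h1 : PySem.List.pyRange 1 11 1 = [1,2,3,4,5,6,7,8,9,10] := by decide
  have h2 : PySem.List.pyRange 0 10 1 = [0,1,2,3,4,5,6,7,8,9] := by decide
  simp only [h1, h2, List.foldl_cons, List.foldl_nil,
    show ((1:Int) - 1) = 0 from by norm_num, show ((2:Int) - 1) = 1 from by norm_num,
    show ((3:Int) - 1) = 2 from by norm_num, show ((4:Int) - 1) = 3 from by norm_num,
    show ((5:Int) - 1) = 4 from by norm_num, show ((6:Int) - 1) = 5 from by norm_num,
    show ((7:Int) - 1) = 6 from by norm_num, show ((8:Int) - 1) = 7 from by norm_num,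
    show ((9:Int) - 1) = 8 from by norm_num, show ((10:Int) - 1) = 9 from by norm_num]
  generalize f 0 = b0
  generalize f 1 = b1
  generalize f 2 = b2
  generalize f 3 = b3
  generalize f 4 = b4
  generalize f 5 = b5
  generalize f 6 = b6
  generalize f 7 = b7
  generalize f 8 = b8
  generalize f 9 = b9
  revert b0 b1 b2 b3 b4 b5 b6 b7 b8 b9
  decide

theorem is_split_eq_alt (pins : String) : is_split pins = is_split_alt pins := by
  unfold is_split is_split_alt
  cases h0 : PySem.Str.pyGet? pins 0 with
  | none => rfl
  | some c0 =>
    by_cases hc0 : c0 = '0'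
    · simp [hc0]
    · simp only [if_neg hc0]
      have hA : (fun (acc : List Int) (i : Int) =>
          match PySem.Str.pyGet? pins (i - 1) with
          | none => acc
          | some c => if c = '1' then acc ++ [i] else acc)
          = fun acc i => if pvBit pins (i - 1) then acc ++ [i] else acc := by
        funext acc i
        obtain h | ⟨c, h⟩ := Option.eq_none_or_eq_some (PySem.List.pyGet? pins.toList (i - 1)) <;>
          simp [pvBit, PySem.Str.pyGet?, h]
      have hB : (fun (m : Int) (i : Int) =>
          match PySem.Str.pyGet? pins i with
          | none => m
          | some c => if c = '1' then Int.lor m ((1 : Int) <<< i.toNat) else m)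
          = fun m i => if pvBit pins i then Int.lor m ((1 : Int) <<< i.toNat) else m := by
        funext m i
        obtain h | ⟨c, h⟩ := Option.eq_none_or_eq_some (PySem.List.pyGet? pins.toList i) <;>
          simp [pvBit, PySem.Str.pyGet?, h]
      rw [hA, hB]
      exact pv_key (pvBit pins)

-- ===== VERDICT (by name: the statement is the Claim_ definition above) =====
theorem is_split_spec : Claim_equal_is_split := by
  intro pins _ _
  unfold Spec_is_split
  exact is_split_eq_alt pins
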